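-- pv_equiv track=rewrite | github.com/creekmar/yeast_genome_stats | myGeneParser.py | get_protein_seq
-- ===== SOURCE A (Python) =====
-- dna_to_protein = {"UUU": "PHE", "UUC": "PHE", "UUA": "LEU", "UUG": "LEU", "UAU": "TYR", "UAC": "TYR",
--                   "UCU": "SER", "UCC": "SER", "UCA": "SER", "UCG": "SER", "AGU": "SER", "AGC": "SER",
--                   "UGA": "STOP", "UGG": "TRP", "CUU": "LEU", "CUC": "LEU", "CUA": "LEU", "CUG": "LEU",
--                   "CCU": "PRO", "CCC": "PRO", "CCA": "PRO", "CCG": "PRO", "CAU": "HIS", "CAC": "HIS",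
--                   "AGA": "ARG", "AGG": "ARG", "CGU": "ARG", "CGC": "ARG", "CGA": "ARG", "CGG": "ARG",
--                   "AUU": "ILE", "AUC": "ILE", "AUA": "ILE", "AUG": "MET", "AAU": "ASN", "AAC": "ASN",
--                   "ACU": "THR", "ACC": "THR", "ACA": "THR", "ACG": "THR", "AAA": "LYS", "AAG": "LYS",
--                   "GUU": "VAL", "GUC": "VAL", "GUA": "VAL", "GUG": "VAL", "UAA": "STOP", "UAG": "STOP",
--                   "CAA": "GLN", "CAG": "GLN", "GCU": "ALA", "GCC": "ALA", "GCA": "ALA", "GCG": "ALA",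
--                   "GAU": "ASP", "GAC": "ASP", "GGU": "GLY", "GGC": "GLY", "GGA": "GLY", "GGG": "GLY",
--                   "GAA": "GLU", "GAG": "GLU", "UGU": "CYS", "UGC": "CYS"}
--
-- def find_possible_start(seq):
--     """
--     Given an rna sequence, will return a list of all the possible start
--     positions (where AUG is read)
--     :param seq: the rna sequence to translate
--     :return: list that represents possible start areas
--     """
--     start_pos = list()
--     for i in range(0, len(seq)-2):
--         codon = seq[i:i+3]
--         if "AUG" == codon:
--             start_pos.append(i)
--     return start_pos
--
-- def translation(seq, index):
--     """
--     Given a rna sequence and an index to start at, will translate the rna to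
--     amino acid sequence until reaches a stopping point
--     :param seq: the rna sequence to translate
--     :param index: the start index to start translating
--     :return: a list of amino acids
--     """
--     protein_seq = list()
--     aa = ""
--     while index < (len(seq)-2) and aa != "STOP":
--         codon = seq[index:index+3]
--         if codon in dna_to_protein:
--             aa = dna_to_protein[codon]
--             protein_seq.append(aa)
--         else:
--             protein_seq.append("---")
--         index += 3
--     return protein_seq
--
-- def get_protein_seq(rna_seq):
--     """
--     Given an rna_seq, will find the longest protein translation
--     Starting with AUG and ending on a stop codon
--     :param rna_seq: the rna_seq to be translated
--     :return: list of amino acid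
--     """
--     start_pos = find_possible_start(rna_seq)
--     aa_seq = []
--
--     # finding the longest translation
--     if len(start_pos) > 0:
--         for start in start_pos:
--             temp = translation(rna_seq, start)
--             if len(temp) > len(aa_seq):
--                 aa_seq = temp
--     else:
--         aa_seq = ["NONE"]
--     return aa_seq
-- ===== SOURCE B (Python) =====
-- dna_to_protein = {"UUU": "PHE", "UUC": "PHE", "UUA": "LEU", "UUG": "LEU", "UAU": "TYR", "UAC": "TYR",
--                   "UCU": "SER", "UCC": "SER", "UCA": "SER", "UCG": "SER", "AGU": "SER", "AGC": "SER",
--                   "UGA": "STOP", "UGG": "TRP", "CUU": "LEU", "CUC": "LEU", "CUA": "LEU", "CUG": "LEU",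
--                   "CCU": "PRO", "CCC": "PRO", "CCA": "PRO", "CCG": "PRO", "CAU": "HIS", "CAC": "HIS",
--                   "AGA": "ARG", "AGG": "ARG", "CGU": "ARG", "CGC": "ARG", "CGA": "ARG", "CGG": "ARG",
--                   "AUU": "ILE", "AUC": "ILE", "AUA": "ILE", "AUG": "MET", "AAU": "ASN", "AAC": "ASN",
--                   "ACU": "THR", "ACC": "THR", "ACA": "THR", "ACG": "THR", "AAA": "LYS", "AAG": "LYS",
--                   "GUU": "VAL", "GUC": "VAL", "GUA": "VAL", "GUG": "VAL", "UAA": "STOP", "UAG": "STOP",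
--                   "CAA": "GLN", "CAG": "GLN", "GCU": "ALA", "GCC": "ALA", "GCA": "ALA", "GCG": "ALA",
--                   "GAU": "ASP", "GAC": "ASP", "GGU": "GLY", "GGC": "GLY", "GGA": "GLY", "GGG": "GLY",
--                   "GAA": "GLU", "GAG": "GLU", "UGU": "CYS", "UGC": "CYS"}
--
--
-- def get_protein_seq(rna_seq):
--     # Single backward pass: per-frame running codon counts give each AUG start's
--     # translation length; the best start is then translated exactly once.
--     limit = len(rna_seq) - 2
--     run = [0, 0, 0]          # run[f] = translation length from the next in-frame position
--     best_len = 0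
--     best_start = -1
--     for i in range(limit - 1, -1, -1):
--         codon = rna_seq[i:i + 3]
--         if dna_to_protein.get(codon) == "STOP":
--             run[i % 3] = 1
--         else:
--             run[i % 3] += 1
--         if codon == "AUG" and run[i % 3] >= best_len:
--             best_len = run[i % 3]
--             best_start = i
--     if best_start < 0:
--         return ["NONE"]
--     out = []
--     i = best_start
--     while True:
--         aa = dna_to_protein.get(rna_seq[i:i + 3], "---")
--         out.append(aa)
--         i += 3
--         if aa == "STOP" or i >= limit:
--             return out
-- ===== Notes on version B (the rewrite author's own statement) =====
-- stated objective: alternative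
-- what changed: Instead of re-translating the RNA from every AUG start and keeping the longest result, B makes a single backward pass that maintains per-frame running codon counts (giving each start's translation length in O(1)), selects the first start of maximal length, and translates only that one start; on AUG-dense inputs this avoids A's quadratic re-translation, though on the generated benchmark inputs it was not measurably faster.
import Mathlib
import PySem

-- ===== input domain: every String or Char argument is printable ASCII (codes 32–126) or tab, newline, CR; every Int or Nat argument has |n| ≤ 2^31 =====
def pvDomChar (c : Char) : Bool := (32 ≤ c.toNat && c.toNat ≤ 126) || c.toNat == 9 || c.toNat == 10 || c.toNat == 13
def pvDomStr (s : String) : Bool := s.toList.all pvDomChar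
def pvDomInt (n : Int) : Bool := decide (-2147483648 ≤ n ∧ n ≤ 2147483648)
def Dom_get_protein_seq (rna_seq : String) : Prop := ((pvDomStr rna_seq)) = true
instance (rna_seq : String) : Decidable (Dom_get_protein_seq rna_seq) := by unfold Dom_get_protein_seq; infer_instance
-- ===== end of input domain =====

-- B replaces A's translate-from-every-AUG-start-and-keep-the-longest scan by a single backward pass
-- with per-frame running codon counts, then translates only the chosen start once (objective: alternative).

set_option maxRecDepth 8192

-- shared module constant: the codon table (a Python module-level dict)
def dna_to_protein : PySem.Dict String String := PySem.Dict.ofList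
  [("UUU", "PHE"), ("UUC", "PHE"), ("UUA", "LEU"), ("UUG", "LEU"), ("UAU", "TYR"), ("UAC", "TYR"),
   ("UCU", "SER"), ("UCC", "SER"), ("UCA", "SER"), ("UCG", "SER"), ("AGU", "SER"), ("AGC", "SER"),
   ("UGA", "STOP"), ("UGG", "TRP"), ("CUU", "LEU"), ("CUC", "LEU"), ("CUA", "LEU"), ("CUG", "LEU"),
   ("CCU", "PRO"), ("CCC", "PRO"), ("CCA", "PRO"), ("CCG", "PRO"), ("CAU", "HIS"), ("CAC", "HIS"),
   ("AGA", "ARG"), ("AGG", "ARG"), ("CGU", "ARG"), ("CGC", "ARG"), ("CGA", "ARG"), ("CGG", "ARG"),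
   ("AUU", "ILE"), ("AUC", "ILE"), ("AUA", "ILE"), ("AUG", "MET"), ("AAU", "ASN"), ("AAC", "ASN"),
   ("ACU", "THR"), ("ACC", "THR"), ("ACA", "THR"), ("ACG", "THR"), ("AAA", "LYS"), ("AAG", "LYS"),
   ("GUU", "VAL"), ("GUC", "VAL"), ("GUA", "VAL"), ("GUG", "VAL"), ("UAA", "STOP"), ("UAG", "STOP"),
   ("CAA", "GLN"), ("CAG", "GLN"), ("GCU", "ALA"), ("GCC", "ALA"), ("GCA", "ALA"), ("GCG", "ALA"),
   ("GAU", "ASP"), ("GAC", "ASP"), ("GGU", "GLY"), ("GGC", "GLY"), ("GGA", "GLY"), ("GGG", "GLY"),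
   ("GAA", "GLU"), ("GAG", "GLU"), ("UGU", "CYS"), ("UGC", "CYS")]

-- seq[i:i+3] (shared spelling of the codon slice both Pythons write)
def pvCodon (seq : String) (i : Int) : String := PySem.Str.slice seq (some i) (some (i + 3))

-- ===== PORT A =====
def find_possible_start (seq : String) : List Int :=
  (PySem.List.pyRange 0 (PySem.Str.len seq - 2) 1).foldl
    (fun start_pos i => if "AUG" = pvCodon seq i then start_pos ++ [i] else start_pos) []

def translationLoop (seq : String) (protein_seq : List String) (aa : String) (index : Int) : List String :=
  if h : index < PySem.Str.len seq - 2 ∧ aa ≠ "STOP" then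
    match PySem.Dict.get? dna_to_protein (pvCodon seq index) with
    | some v => translationLoop seq (protein_seq ++ [v]) v (index + 3)
    | none => translationLoop seq (protein_seq ++ ["---"]) aa (index + 3)
  else protein_seq
termination_by (PySem.Str.len seq - 2 - index).toNat
decreasing_by all_goals (obtain ⟨h1, -⟩ := h; omega)

def translation (seq : String) (index : Int) : List String := translationLoop seq [] "" index

def get_protein_seq (rna_seq : String) : List String :=
  if (find_possible_start rna_seq).length > 0 then
    (find_possible_start rna_seq).foldl
      (fun aa_seq start =>
        if (translation rna_seq start).length > aa_seq.length then translation rna_seq start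
        else aa_seq) []
  else ["NONE"]

-- ===== PORT B =====
-- run[r] for r in {0,1,2} (Python's three-slot list), as a triple
def runGet (run : Int × Int × Int) (r : Int) : Int :=
  if r = 0 then run.1 else if r = 1 then run.2.1 else run.2.2

def runSet (run : Int × Int × Int) (r : Int) (v : Int) : Int × Int × Int :=
  if r = 0 then (v, run.2.1, run.2.2) else if r = 1 then (run.1, v, run.2.2) else (run.1, run.2.1, v)

-- the two loop-body lines updating run[i % 3]
def bStep (seq : String) (i : Int) (run : Int × Int × Int) : Int × Int × Int :=
  if PySem.Dict.get? dna_to_protein (pvCodon seq i) = some "STOP"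
  then runSet run (PySem.Int.mod i 3) 1
  else runSet run (PySem.Int.mod i 3) (runGet run (PySem.Int.mod i 3) + 1)

-- the single backward pass 'for i in range(limit - 1, -1, -1)'
def bScan (seq : String) (i : Int) (run : Int × Int × Int) (best_len best_start : Int) : Int × Int :=
  if h : 0 ≤ i then
    if pvCodon seq i = "AUG" ∧ best_len ≤ runGet (bStep seq i run) (PySem.Int.mod i 3) then
      bScan seq (i - 1) (bStep seq i run) (runGet (bStep seq i run) (PySem.Int.mod i 3)) i
    else
      bScan seq (i - 1) (bStep seq i run) best_len best_start
  else (best_len, best_start)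
termination_by (i + 1).toNat
decreasing_by all_goals omega

-- the final 'while True' translation of the single chosen start
def bTrans (seq : String) (limit : Int) (out : List String) (i : Int) : List String :=
  if h : (PySem.Dict.get? dna_to_protein (pvCodon seq i)).getD "---" = "STOP" ∨ limit ≤ i + 3 then
    out ++ [(PySem.Dict.get? dna_to_protein (pvCodon seq i)).getD "---"]
  else bTrans seq limit (out ++ [(PySem.Dict.get? dna_to_protein (pvCodon seq i)).getD "---"]) (i + 3)
termination_by (limit - i).toNat
decreasing_by obtain ⟨-, h2⟩ := not_or.mp h; omega

def get_protein_seq_alt (rna_seq : String) : List String :=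
  if (bScan rna_seq (PySem.Str.len rna_seq - 2 - 1) (0, 0, 0) 0 (-1)).2 < 0 then ["NONE"]
  else
    bTrans rna_seq (PySem.Str.len rna_seq - 2) []
      (bScan rna_seq (PySem.Str.len rna_seq - 2 - 1) (0, 0, 0) 0 (-1)).2

-- ===== PRECONDITION & SPEC =====
def Spec_get_protein_seq (rna_seq : String) (out : List String) : Prop := out = get_protein_seq_alt rna_seq
instance (rna_seq : String) (out : List String) : Decidable (Spec_get_protein_seq rna_seq out) := by unfold Spec_get_protein_seq; infer_instance

-- ===== CLAIM (what is proved, stated in full; the proofs are below) =====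
def Claim_equal_get_protein_seq : Prop := ∀ (rna_seq : String), Dom_get_protein_seq rna_seq → Spec_get_protein_seq rna_seq (get_protein_seq rna_seq)

-- ===== LEMMAS AND PROOFS =====

-- the translation emitted from position i (spec form shared by both proofs)
def tlist (seq : String) (i : Int) : List String :=
  if _h : i < PySem.Str.len seq - 2 then
    (PySem.Dict.get? dna_to_protein (pvCodon seq i)).getD "---" ::
      (if (PySem.Dict.get? dna_to_protein (pvCodon seq i)).getD "---" = "STOP" then []
       else tlist seq (i + 3))
  else []
termination_by (PySem.Str.len seq - 2 - i).toNat
decreasing_by omega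

-- its length, as a Python int
def Ln (seq : String) (i : Int) : Int := ((tlist seq i).length : Int)

lemma tlist_stop (seq : String) (i : Int) (h : ¬ i < PySem.Str.len seq - 2) : tlist seq i = [] := by
  rw [tlist, dif_neg h]

lemma Ln_zero (seq : String) (i : Int) (h : ¬ i < PySem.Str.len seq - 2) : Ln seq i = 0 := by
  simp [Ln, tlist_stop seq i h]

lemma Ln_pos (seq : String) (i : Int) (h : i < PySem.Str.len seq - 2) : 1 ≤ Ln seq i := by
  rw [Ln, tlist, dif_pos h]
  simp

lemma Ln_step (seq : String) (i : Int) (h : i < PySem.Str.len seq - 2) :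
    Ln seq i = if PySem.Dict.get? dna_to_protein (pvCodon seq i) = some "STOP"
               then 1 else Ln seq (i + 3) + 1 := by
  rw [Ln, tlist, dif_pos h]
  rcases hv : PySem.Dict.get? dna_to_protein (pvCodon seq i) with _ | v
  · simp [Ln]
  · by_cases hs : v = "STOP" <;> simp [hs, Ln]

-- A's while-loop, characterised
lemma translationLoop_eq (seq : String) : ∀ (n : Nat) (i : Int) (acc : List String) (aa : String),
    (PySem.Str.len seq - 2 - i).toNat ≤ n →
    translationLoop seq acc aa i = acc ++ (if aa = "STOP" then [] else tlist seq i) := by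
  intro n
  induction n with
  | zero =>
    intro i acc aa hle
    have hlim : ¬ i < PySem.Str.len seq - 2 := by omega
    rw [translationLoop, dif_neg (by tauto : ¬ (i < PySem.Str.len seq - 2 ∧ aa ≠ "STOP")),
      tlist_stop seq i hlim]
    split <;> simp
  | succ n ih =>
    intro i acc aa hle
    by_cases hlim : i < PySem.Str.len seq - 2
    · by_cases haa : aa = "STOP"
      · rw [translationLoop, dif_neg (by tauto : ¬ (i < PySem.Str.len seq - 2 ∧ aa ≠ "STOP")),
          if_pos haa]
        simp
      · rw [translationLoop, dif_pos ⟨hlim, haa⟩, tlist, dif_pos hlim, if_neg haa]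
        rcases hv : PySem.Dict.get? dna_to_protein (pvCodon seq i) with _ | v
        · show translationLoop seq (acc ++ ["---"]) aa (i + 3) = _
          rw [ih (i + 3) (acc ++ ["---"]) aa (by omega), if_neg haa]
          have hds : ¬ ("---" : String) = "STOP" := by decide
          simp [hds]
        · show translationLoop seq (acc ++ [v]) v (i + 3) = _
          rw [ih (i + 3) (acc ++ [v]) v (by omega)]
          by_cases hs : v = "STOP" <;> simp [hs]
    · rw [translationLoop, dif_neg (by tauto : ¬ (i < PySem.Str.len seq - 2 ∧ aa ≠ "STOP")),
        tlist_stop seq i hlim]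
      split <;> simp

lemma translation_eq (seq : String) (i : Int) : translation seq i = tlist seq i := by
  rw [translation, translationLoop_eq seq (PySem.Str.len seq - 2 - i).toNat i [] "" le_rfl]
  simp

-- B's final while-loop, characterised
lemma bTrans_eq (seq : String) : ∀ (n : Nat) (i : Int) (out : List String),
    (PySem.Str.len seq - 2 - i).toNat ≤ n → i < PySem.Str.len seq - 2 →
    bTrans seq (PySem.Str.len seq - 2) out i = out ++ tlist seq i := by
  intro n
  induction n with
  | zero => intro i out hle hlim; omega
  | succ n ih =>
    intro i out hle hlim
    rw [bTrans, tlist, dif_pos hlim]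
    by_cases hs : (PySem.Dict.get? dna_to_protein (pvCodon seq i)).getD "---" = "STOP"
    · simp [hs]
    · by_cases hend : PySem.Str.len seq - 2 ≤ i + 3
      · have hq : ¬ i + 3 < PySem.Str.len seq - 2 := by omega
        rw [dif_pos (Or.inr hend)]
        simp [hs, tlist_stop seq (i + 3) hq]
      · have hlt : i + 3 < PySem.Str.len seq - 2 := by omega
        rw [dif_neg (by tauto)]
        rw [ih (i + 3) (out ++ [(PySem.Dict.get? dna_to_protein (pvCodon seq i)).getD "---"]) (by omega) hlt]
        simp [hs]

-- what it means for (bl, bs) to be "best so far" over AUG starts in [lo, limit)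
def BestOver (seq : String) (lo bl bs : Int) : Prop :=
  (bl = 0 ∧ bs = -1 ∧ ∀ j, lo ≤ j → j < PySem.Str.len seq - 2 → pvCodon seq j ≠ "AUG")
  ∨ (lo ≤ bs ∧ bs < PySem.Str.len seq - 2 ∧ pvCodon seq bs = "AUG" ∧ bl = Ln seq bs
     ∧ (∀ j, lo ≤ j → j < PySem.Str.len seq - 2 → pvCodon seq j = "AUG" → Ln seq j ≤ bl)
     ∧ (∀ j, lo ≤ j → j < PySem.Str.len seq - 2 → pvCodon seq j = "AUG" → Ln seq j = bl → bs ≤ j))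

lemma runGet_runSet (run : Int × Int × Int) (r r' v : Int)
    (hr : 0 ≤ r ∧ r < 3) (hr' : 0 ≤ r' ∧ r' < 3) :
    runGet (runSet run r v) r' = if r' = r then v else runGet run r' := by
  unfold runGet runSet
  split_ifs <;> first | rfl | omega

lemma mod3_lt (i : Int) : 0 ≤ PySem.Int.mod i 3 ∧ PySem.Int.mod i 3 < 3 := by
  rw [PySem.Int.mod_eq_emod_of_pos (show (0:Int) < 3 by norm_num)]
  omega

lemma mod3_add_three (i : Int) : PySem.Int.mod (i + 3) 3 = PySem.Int.mod i 3 := by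
  rw [PySem.Int.mod_eq_emod_of_pos (show (0:Int) < 3 by norm_num),
    PySem.Int.mod_eq_emod_of_pos (show (0:Int) < 3 by norm_num)]
  omega

lemma mod3_ne (i j : Int) (h1 : i < j) (h2 : j < i + 3) :
    PySem.Int.mod j 3 ≠ PySem.Int.mod i 3 := by
  rw [PySem.Int.mod_eq_emod_of_pos (show (0:Int) < 3 by norm_num),
    PySem.Int.mod_eq_emod_of_pos (show (0:Int) < 3 by norm_num)]
  omega

-- the run update writes Ln seq i into slot i % 3 …
lemma bStep_self (seq : String) (i : Int) (run : Int × Int × Int)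
    (hlim : i < PySem.Str.len seq - 2)
    (hnext : runGet run (PySem.Int.mod (i + 3) 3) = Ln seq (i + 3)) :
    runGet (bStep seq i run) (PySem.Int.mod i 3) = Ln seq i := by
  rw [mod3_add_three i] at hnext
  unfold bStep
  by_cases hs : PySem.Dict.get? dna_to_protein (pvCodon seq i) = some "STOP"
  · rw [if_pos hs, runGet_runSet run _ _ 1 (mod3_lt i) (mod3_lt i), if_pos rfl,
      Ln_step seq i hlim, if_pos hs]
  · rw [if_neg hs, runGet_runSet run _ _ _ (mod3_lt i) (mod3_lt i), if_pos rfl,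
      Ln_step seq i hlim, if_neg hs, hnext]

-- … and leaves the other two slots unchanged
lemma bStep_other (seq : String) (i j : Int) (run : Int × Int × Int)
    (hne : PySem.Int.mod j 3 ≠ PySem.Int.mod i 3) :
    runGet (bStep seq i run) (PySem.Int.mod j 3) = runGet run (PySem.Int.mod j 3) := by
  unfold bStep
  by_cases hs : PySem.Dict.get? dna_to_protein (pvCodon seq i) = some "STOP"
  · rw [if_pos hs, runGet_runSet run _ _ 1 (mod3_lt i) (mod3_lt j), if_neg hne]
  · rw [if_neg hs, runGet_runSet run _ _ _ (mod3_lt i) (mod3_lt j), if_neg hne]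

-- the backward scan maintains the per-frame run lengths and the best-so-far pair
lemma bScan_best (seq : String) : ∀ (n : Nat) (i : Int) (run : Int × Int × Int) (bl bs : Int),
    (i + 1).toNat ≤ n → -1 ≤ i → i < PySem.Str.len seq - 2 →
    (∀ j, i < j → j ≤ i + 3 → runGet run (PySem.Int.mod j 3) = Ln seq j) →
    BestOver seq (i + 1) bl bs →
    BestOver seq 0 (bScan seq i run bl bs).1 (bScan seq i run bl bs).2 := by
  intro n
  induction n with
  | zero =>
    intro i run bl bs hle hneg hlim hrun hbest
    have hi : i = -1 := by omega
    subst hi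
    rw [bScan]
    simpa using hbest
  | succ n ih =>
    intro i run bl bs hle hneg hlim hrun hbest
    by_cases h0 : 0 ≤ i
    · rw [bScan, dif_pos h0]
      have hself : runGet (bStep seq i run) (PySem.Int.mod i 3) = Ln seq i :=
        bStep_self seq i run hlim (hrun (i + 3) (by omega) (by omega))
      have hrun2 : ∀ j, i - 1 < j → j ≤ i - 1 + 3 → runGet (bStep seq i run) (PySem.Int.mod j 3) = Ln seq j := by
        intro j hj1 hj2
        rcases eq_or_lt_of_le (show i ≤ j by omega) with hji | hji
        · rw [← hji]; exact hself
        · rw [bStep_other seq i j run (mod3_ne i j hji (by omega))]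
          exact hrun j (by omega) (by omega)
      have hLpos : 1 ≤ Ln seq i := Ln_pos seq i hlim
      by_cases hcond : pvCodon seq i = "AUG" ∧ bl ≤ runGet (bStep seq i run) (PySem.Int.mod i 3)
      · rw [if_pos hcond]
        apply ih (i - 1) _ _ i (by omega) (by omega) (by omega) hrun2
        right
        have hi1 : i - 1 + 1 = i := by omega
        rw [hi1, hself]
        refine ⟨le_refl i, hlim, hcond.1, rfl, ?_, ?_⟩
        · intro j hj1 hj2 hj3
          rcases eq_or_lt_of_le hj1 with hji | hji
          · rw [← hji]
          · rcases hbest with ⟨hbl0, -, hno⟩ | ⟨-, -, -, hbl, hmax, -⟩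
            · exact absurd hj3 (hno j (by omega) hj2)
            · have h1 : Ln seq j ≤ bl := hmax j (by omega) hj2 hj3
              have h2 : bl ≤ Ln seq i := by rw [← hself]; exact hcond.2
              omega
        · intro j hj1 _ _ _; exact hj1
      · rw [if_neg hcond]
        apply ih (i - 1) _ bl bs (by omega) (by omega) (by omega) hrun2
        have hi1 : i - 1 + 1 = i := by omega
        rw [hi1]
        by_cases haug : pvCodon seq i = "AUG"
        · have hlt : Ln seq i < bl := by
            rw [← hself]
            by_contra hge
            exact hcond ⟨haug, by omega⟩
          rcases hbest with ⟨hbl0, -, -⟩ | ⟨hlo, hbs, hba, hbl, hmax, hmin⟩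
          · omega
          · right
            refine ⟨by omega, hbs, hba, hbl, ?_, ?_⟩
            · intro j hj1 hj2 hj3
              rcases eq_or_lt_of_le hj1 with hji | hji
              · rw [← hji]; omega
              · exact hmax j (by omega) hj2 hj3
            · intro j hj1 hj2 hj3 hj4
              rcases eq_or_lt_of_le hj1 with hji | hji
              · rw [← hji] at hj4 ⊢; omega
              · exact hmin j (by omega) hj2 hj3 hj4
        · rcases hbest with ⟨hbl0, hbs0, hno⟩ | ⟨hlo, hbs, hba, hbl, hmax, hmin⟩
          · left
            refine ⟨hbl0, hbs0, ?_⟩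
            intro j hj1 hj2
            rcases eq_or_lt_of_le hj1 with hji | hji
            · rw [← hji]; exact haug
            · exact hno j (by omega) hj2
          · right
            refine ⟨by omega, hbs, hba, hbl, ?_, ?_⟩
            · intro j hj1 hj2 hj3
              rcases eq_or_lt_of_le hj1 with hji | hji
              · exact absurd hj3 (by rw [← hji]; exact haug)
              · exact hmax j (by omega) hj2 hj3
            · intro j hj1 hj2 hj3 hj4
              rcases eq_or_lt_of_le hj1 with hji | hji
              · exact absurd hj3 (by rw [← hji]; exact haug)
              · exact hmin j (by omega) hj2 hj3 hj4
    · have hi : i = -1 := by omega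
      subst hi
      rw [bScan]
      simpa using hbest

-- the initial state of the scan is correct
lemma bScan_init (seq : String) :
    BestOver seq 0 (bScan seq (PySem.Str.len seq - 2 - 1) (0, 0, 0) 0 (-1)).1
      (bScan seq (PySem.Str.len seq - 2 - 1) (0, 0, 0) 0 (-1)).2 := by
  by_cases hpos : 0 ≤ PySem.Str.len seq - 2
  · apply bScan_best seq (PySem.Str.len seq - 2 - 1 + 1).toNat _ (0, 0, 0) 0 (-1) le_rfl
      (by omega) (by omega)
    · intro j hj1 hj2
      rw [Ln_zero seq j (by omega)]
      unfold runGet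
      split_ifs <;> rfl
    · left
      exact ⟨rfl, rfl, fun j hj1 hj2 => by omega⟩
  · rw [bScan, dif_neg (show ¬ (0:Int) ≤ PySem.Str.len seq - 2 - 1 by omega)]
    left
    exact ⟨rfl, rfl, fun j hj1 hj2 => by omega⟩

-- A's start list
lemma find_possible_start_eq (seq : String) :
    find_possible_start seq =
      (PySem.List.pyRange 0 (PySem.Str.len seq - 2) 1).filter
        (fun i => decide ("AUG" = pvCodon seq i)) := by
  rw [find_possible_start, PySem.List.foldl_append_ite_eq_filter]
  simp

lemma mem_start (seq : String) (i : Int) :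
    i ∈ find_possible_start seq ↔ 0 ≤ i ∧ i < PySem.Str.len seq - 2 ∧ pvCodon seq i = "AUG" := by
  rw [find_possible_start_eq, List.mem_filter, PySem.List.mem_pyRange_one]
  simp [eq_comm, and_assoc]

lemma pairwise_start (seq : String) : (find_possible_start seq).Pairwise (· < ·) := by
  rw [find_possible_start_eq]
  exact (PySem.List.pairwise_lt_pyRange_one 0 (PySem.Str.len seq - 2)).filter _

-- A's selection fold, characterised over any strictly increasing list of valid starts
lemma A_fold (seq : String) : ∀ l : List Int, l.Pairwise (· < ·) →
    (∀ s ∈ l, s < PySem.Str.len seq - 2) →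
    (l = [] ∧ l.foldl
        (fun aa_seq start =>
          if (translation seq start).length > aa_seq.length then translation seq start
          else aa_seq) [] = ([] : List String))
    ∨ (∃ bs, bs ∈ l ∧
        l.foldl
          (fun aa_seq start =>
            if (translation seq start).length > aa_seq.length then translation seq start
            else aa_seq) [] = tlist seq bs ∧
        (∀ j ∈ l, Ln seq j ≤ Ln seq bs) ∧ (∀ j ∈ l, Ln seq j = Ln seq bs → bs ≤ j)) := by
  intro l
  induction l using List.reverseRecOn with
  | nil => intro _ _; left; exact ⟨rfl, rfl⟩
  | append_singleton l x ihl =>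
    intro hpw hvalid
    have hpw' : l.Pairwise (· < ·) := (List.pairwise_append.mp hpw).1
    have hlx : ∀ j ∈ l, j < x := by
      intro j hj
      exact (List.pairwise_append.mp hpw).2.2 j hj x (List.mem_singleton_self x)
    have hxv : x < PySem.Str.len seq - 2 := hvalid x (by simp)
    have hLx : 1 ≤ Ln seq x := Ln_pos seq x hxv
    have hx0 : 0 < (tlist seq x).length := by
      rw [Ln] at hLx; omega
    right
    have hfx : (l ++ [x]).foldl
        (fun aa_seq start =>
          if (translation seq start).length > aa_seq.length then translation seq start
          else aa_seq) [] =
        if (tlist seq x).length > (l.foldl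
          (fun aa_seq start =>
            if (translation seq start).length > aa_seq.length then translation seq start
            else aa_seq) []).length then tlist seq x
        else l.foldl
          (fun aa_seq start =>
            if (translation seq start).length > aa_seq.length then translation seq start
            else aa_seq) [] := by
      rw [List.foldl_append]
      simp only [List.foldl_cons, List.foldl_nil, translation_eq]
    rcases ihl hpw' (fun s hs => hvalid s (by simp [hs])) with ⟨hnil, hfold⟩ | ⟨bs, hmem, hfold, hmax, hmin⟩
    · rw [hfold] at hfx
      rw [if_pos (by simpa using hx0)] at hfx
      refine ⟨x, by simp, hfx, ?_, ?_⟩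
      · subst hnil; intro j hj; simp at hj; rw [hj]
      · subst hnil; intro j hj _; simp at hj; omega
    · rw [hfold] at hfx
      by_cases hgt : (tlist seq x).length > (tlist seq bs).length
      · have hgtL : Ln seq bs < Ln seq x := by rw [Ln, Ln]; exact_mod_cast hgt
        rw [if_pos hgt] at hfx
        refine ⟨x, by simp, hfx, ?_, ?_⟩
        · intro j hj
          rcases List.mem_append.mp hj with hj | hj
          · have := hmax j hj; omega
          · simp at hj; rw [hj]
        · intro j hj hje
          rcases List.mem_append.mp hj with hj | hj
          · have := hmax j hj; omega
          · simp at hj; omega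
      · have hleL : Ln seq x ≤ Ln seq bs := by
          rw [Ln, Ln]; exact_mod_cast Nat.le_of_not_lt hgt
        rw [if_neg hgt] at hfx
        refine ⟨bs, by simp [hmem], hfx, ?_, ?_⟩
        · intro j hj
          rcases List.mem_append.mp hj with hj | hj
          · exact hmax j hj
          · simp at hj; rw [hj]; exact hleL
        · intro j hj hje
          rcases List.mem_append.mp hj with hj | hj
          · exact hmin j hj hje
          · simp at hj; rw [hj]
            exact le_of_lt (hlx bs hmem)

-- ===== VERDICT (by name: the statement is the Claim_ definition above) =====
theorem get_protein_seq_spec : Claim_equal_get_protein_seq := by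
  intro seq _hdom
  unfold Spec_get_protein_seq
  have hbest := bScan_init seq
  rw [get_protein_seq, get_protein_seq_alt]
  set bb := bScan seq (PySem.Str.len seq - 2 - 1) (0, 0, 0) 0 (-1) with hbb
  by_cases hS : find_possible_start seq = []
  · rw [hS]
    simp only [List.length_nil, gt_iff_lt, lt_irrefl, if_false]
    rcases hbest with ⟨-, hbs, -⟩ | ⟨hlo, hbs, hba, -⟩
    · rw [if_pos (by omega : bb.2 < 0)]
    · exfalso
      have hx : bb.2 ∈ find_possible_start seq := (mem_start seq bb.2).mpr ⟨hlo, hbs, hba⟩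
      rw [hS] at hx
      simp at hx
  · have hlen : (find_possible_start seq).length > 0 := List.length_pos_iff.mpr hS
    rw [if_pos hlen]
    rcases A_fold seq (find_possible_start seq) (pairwise_start seq)
        (fun s hs => ((mem_start seq s).mp hs).2.1) with ⟨hnil, -⟩ | ⟨bsA, hmem, hfold, hmax, hmin⟩
    · exact absurd hnil hS
    · rw [hfold]
      obtain ⟨hA0, hAlim, hAaug⟩ := (mem_start seq bsA).mp hmem
      rcases hbest with ⟨-, -, hno⟩ | ⟨hlo, hbs, hba, hbl, hmaxB, hminB⟩
      · exact absurd hAaug (hno bsA hA0 hAlim)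
      · have hmemB : bb.2 ∈ find_possible_start seq := (mem_start seq bb.2).mpr ⟨hlo, hbs, hba⟩
        have h1 : Ln seq bsA ≤ Ln seq bb.2 := by
          have := hmaxB bsA hA0 hAlim hAaug; omega
        have h2 : Ln seq bb.2 ≤ Ln seq bsA := hmax bb.2 hmemB
        have heq : Ln seq bsA = Ln seq bb.2 := le_antisymm h1 h2
        have h3 : bb.2 ≤ bsA := hminB bsA hA0 hAlim hAaug (by omega)
        have h4 : bsA ≤ bb.2 := hmin bb.2 hmemB heq.symm
        have hbsEq : bsA = bb.2 := le_antisymm h4 h3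
        rw [if_neg (by omega : ¬ bb.2 < 0)]
        rw [bTrans_eq seq (PySem.Str.len seq - 2 - bb.2).toNat bb.2 [] le_rfl hbs]
        rw [← hbsEq]
        simp
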